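-- pv_equiv track=rewrite | github.com/dynaroars/dig | tests/derivative_analysis/varDeg.py | makeFunc
-- ===== SOURCE A (Python) =====
-- def makeFunc(list1, list2):
--     newlist1 = []
--     newlist2 = []
--     length = len(list1)
--     i = 0
--     while i<length:
--         while i+1 < length and list1[i+1] == list1[i]:
--             i+=1
--         newlist1.append(list1[i])
--         newlist2.append(list2[i])
--         i+=1
--     return (newlist1, newlist2)
-- ===== SOURCE B (Python) =====
-- def makeFunc(list1, list2):
--     newlist1 = []
--     newlist2 = []
--     pos = 0
--     for value, runlen in _runs(list1):
--         pos += runlen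
--         newlist1.append(value)
--         newlist2.append(list2[pos - 1])
--     return (newlist1, newlist2)
--
--
-- def _runs(seq):
--     # run-length encoding of seq in one pass: extend the last run or open a new one
--     runs = []
--     for x in seq:
--         if runs and runs[-1][0] == x:
--             y, k = runs[-1]
--             runs[-1] = (y, k + 1)
--         else:
--             runs.append((x, 1))
--     return runs
-- ===== Notes on version B (the rewrite author's own statement) =====
-- stated objective: alternative
-- what changed: Replaces the nested skip-ahead while-loop over indices with a one-pass run-length encoding of list1 followed by a pass over the runs that emits each run's value and list2 at the run's last index.
import Mathlib
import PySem

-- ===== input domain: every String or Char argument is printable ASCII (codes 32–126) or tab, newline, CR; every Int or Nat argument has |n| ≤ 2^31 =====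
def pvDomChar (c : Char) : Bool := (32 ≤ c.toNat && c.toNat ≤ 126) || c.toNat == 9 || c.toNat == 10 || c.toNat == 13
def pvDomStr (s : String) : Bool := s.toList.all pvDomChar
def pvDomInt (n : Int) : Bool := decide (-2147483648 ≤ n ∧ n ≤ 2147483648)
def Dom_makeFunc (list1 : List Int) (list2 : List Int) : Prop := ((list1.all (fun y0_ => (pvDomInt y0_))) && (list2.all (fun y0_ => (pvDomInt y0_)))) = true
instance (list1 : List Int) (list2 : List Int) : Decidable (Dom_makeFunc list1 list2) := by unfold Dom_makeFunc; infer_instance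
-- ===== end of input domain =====

-- B replaces A's nested skip-ahead index loop by a one-pass run-length encoding of list1
-- followed by a pass over the runs (alternative decomposition; same asymptotic cost).


-- ===== PORT A =====
-- inner while: while i+1 < length and list1[i+1] == list1[i]: i += 1
-- (fuel = list1.length bounds the loop; i advances by 1 each iteration, so it never runs out)
def skipA (list1 : List Int) : Nat → Nat → Nat
  | 0, i => i
  | fuel + 1, i =>
    if i + 1 < list1.length ∧ list1[i+1]! = list1[i]! then skipA list1 fuel (i+1) else i

-- outer while loop; list2[i] is ported with pyGetD (Pre_ excludes the out-of-range IndexError)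
def loopA (list1 list2 : List Int) : Nat → Nat → List Int × List Int
  | 0, _ => ([], [])
  | fuel + 1, i =>
    if i < list1.length then
      (list1[skipA list1 list1.length i]! ::
          (loopA list1 list2 fuel (skipA list1 list1.length i + 1)).1,
        (PySem.List.pyGetD list2 ((skipA list1 list1.length i : Nat) : Int) 0)
          :: (loopA list1 list2 fuel (skipA list1 list1.length i + 1)).2)
    else ([], [])

def makeFunc (list1 : List Int) (list2 : List Int) : List Int × List Int :=
  loopA list1 list2 list1.length 0

-- ===== PORT B =====
-- _runs: the Python runs list mutates its LAST entry, ported as a foldl keeping the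
-- runs in reverse order (head = Python runs[-1]), reversed at the end.
def stepRun (acc : List (Int × Nat)) (x : Int) : List (Int × Nat) :=
  match acc with
  | (y, k) :: rest => if y = x then (y, k + 1) :: rest else (x, 1) :: (y, k) :: rest
  | [] => [(x, 1)]

def runsB (l : List Int) : List (Int × Nat) := (l.foldl stepRun []).reverse

-- the for loop over the runs, emitting one element of each output list per run
def emitB (list2 : List Int) : List (Int × Nat) → Nat → List Int × List Int
  | [], _ => ([], [])
  | (v, k) :: rest, pos =>
    (v :: (emitB list2 rest (pos + k)).1,
      (PySem.List.pyGetD list2 ((pos + k - 1 : Nat) : Int) 0) :: (emitB list2 rest (pos + k)).2)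

def makeFunc_alt (list1 : List Int) (list2 : List Int) : List Int × List Int :=
  emitB list2 (runsB list1) 0

-- ===== PRECONDITION & SPEC =====
-- Pre_ excludes exactly the inputs where Python A raises IndexError: for nonempty list1
-- it always reads list2[len(list1)-1], so it returns iff list1 = [] or len list1 ≤ len list2.
def Pre_makeFunc (list1 : List Int) (list2 : List Int) : Prop :=
  list1 = [] ∨ list1.length ≤ list2.length
instance (list1 : List Int) (list2 : List Int) : Decidable (Pre_makeFunc list1 list2) := by
  unfold Pre_makeFunc; infer_instance

def pvWitness_makeFunc : List Int × List Int := ([1, 1, 2], [10, 20, 30])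

def Spec_makeFunc (list1 : List Int) (list2 : List Int) (out : List Int × List Int) : Prop := out = makeFunc_alt list1 list2
instance (list1 : List Int) (list2 : List Int) (out : List Int × List Int) : Decidable (Spec_makeFunc list1 list2 out) := by unfold Spec_makeFunc; infer_instance

-- ===== CLAIM (what is proved, stated in full; the proofs are below) =====
def Claim_equal_makeFunc : Prop := ∀ (list1 : List Int) (list2 : List Int), Dom_makeFunc list1 list2 → Pre_makeFunc list1 list2 → Spec_makeFunc list1 list2 (makeFunc list1 list2)

-- ===== LEMMAS AND PROOFS =====

-- reference run-length encoding by takeWhile/dropWhile; both ports are reduced to it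
def specRuns : List Int → List (Int × Nat)
  | [] => []
  | x :: xs =>
    (x, 1 + (xs.takeWhile (· == x)).length) :: specRuns (xs.dropWhile (· == x))
termination_by l => l.length
decreasing_by
  have := List.length_dropWhile_le (· == x) xs
  simp; omega

theorem dropWhile_eq_drop {α : Type} (p : α → Bool) (l : List α) :
    l.dropWhile p = l.drop (l.takeWhile p).length := by
  induction l with
  | nil => rfl
  | cons a l ih =>
    by_cases h : p a = true <;> simp [List.dropWhile_cons, List.takeWhile_cons, h, ih]

theorem skipA_ge (list1 : List Int) : ∀ (fuel i : Nat), i ≤ skipA list1 fuel i := by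
  intro fuel
  induction fuel with
  | zero => intro i; simp [skipA]
  | succ fuel ih =>
    intro i
    rw [skipA]
    split
    · exact le_trans (by omega) (ih (i+1))
    · exact le_refl i

theorem skipA_spec (list1 : List Int) :
    ∀ (fuel i : Nat), list1.length ≤ i + 1 + fuel → i < list1.length →
    skipA list1 fuel i = i + ((list1.drop (i+1)).takeWhile (· == list1[i]!)).length ∧
      list1[skipA list1 fuel i]! = list1[i]! := by
  intro fuel
  induction fuel with
  | zero =>
    intro i hf hi
    have hd : list1.drop (i+1) = [] := List.drop_eq_nil_of_le (by omega)
    simp [skipA, hd]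
  | succ fuel ih =>
    intro i hf hi
    rw [skipA]
    by_cases h : i + 1 < list1.length ∧ list1[i+1]! = list1[i]!
    · rw [if_pos h]
      obtain ⟨h1, h2⟩ := h
      have ih' := ih (i+1) (by omega) h1
      rw [h2] at ih'
      have hgi : list1[i+1]! = list1[i+1] := getElem!_pos list1 (i+1) h1
      have hdrop : list1.drop (i+1) = list1[i+1]! :: list1.drop (i+1+1) := by
        rw [hgi]; exact List.drop_eq_getElem_cons h1
      refine ⟨?_, ih'.2⟩
      rw [hdrop]
      simp only [List.takeWhile_cons, h2, beq_self_eq_true, if_true, List.length_cons]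
      rw [ih'.1]
      omega
    · rw [if_neg h]
      refine ⟨?_, rfl⟩
      by_cases h1 : i + 1 < list1.length
      · have h2 : ¬ list1[i+1]! = list1[i]! := fun he => h ⟨h1, he⟩
        have hgi : list1[i+1]! = list1[i+1] := getElem!_pos list1 (i+1) h1
        have hdrop : list1.drop (i+1) = list1[i+1]! :: list1.drop (i+1+1) := by
          rw [hgi]; exact List.drop_eq_getElem_cons h1
        have hb : (list1[i+1]! == list1[i]!) = false := by
          rw [beq_eq_false_iff_ne]; exact h2
        rw [hdrop]
        simp only [List.takeWhile_cons, hb, Bool.false_eq_true, if_false, List.length_nil,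
          Nat.add_zero]
      · have hd : list1.drop (i+1) = [] := List.drop_eq_nil_of_le (by omega)
        simp [hd]

theorem loopA_eq_emitB (list1 list2 : List Int) :
    ∀ (fuel i : Nat), list1.length ≤ i + fuel →
      loopA list1 list2 fuel i = emitB list2 (specRuns (list1.drop i)) i := by
  intro fuel
  induction fuel with
  | zero =>
    intro i hk
    have hdrop : list1.drop i = [] := List.drop_eq_nil_of_le (by omega)
    rw [hdrop]
    simp [loopA, specRuns, emitB]
  | succ fuel ih =>
    intro i hk
    rw [loopA]
    by_cases hi : i < list1.length
    · rw [if_pos hi]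
      have hgi : list1[i]! = list1[i] := getElem!_pos list1 i hi
      have hdrop : list1.drop i = list1[i]! :: list1.drop (i+1) := by
        rw [hgi]; exact List.drop_eq_getElem_cons hi
      obtain ⟨hs1, hs2⟩ := skipA_spec list1 list1.length i (by omega) hi
      set t := ((list1.drop (i+1)).takeWhile (· == list1[i]!)).length with ht
      have hdw : (list1.drop (i+1)).dropWhile (· == list1[i]!) = list1.drop (i + (1 + t)) := by
        rw [dropWhile_eq_drop, List.drop_drop, ← ht]
        congr 1
        omega
      have hge := skipA_ge list1 list1.length i
      have e : skipA list1 list1.length i + 1 = i + (1 + t) := by omega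
      have hrec : loopA list1 list2 fuel (skipA list1 list1.length i + 1) =
          emitB list2 (specRuns (list1.drop (i + (1 + t)))) (i + (1 + t)) := by
        rw [ih (skipA list1 list1.length i + 1) (by omega), e]
      rw [hdrop]
      simp only [specRuns, ← ht, hdw, emitB]
      rw [hrec, hs2]
      have hidx : i + (1 + t) - 1 = skipA list1 list1.length i := by omega
      rw [hidx]
    · rw [if_neg hi]
      have hdrop : list1.drop i = [] := List.drop_eq_nil_of_le (by omega)
      rw [hdrop]
      simp [specRuns, emitB]

theorem foldl_stepRun_spec :
    ∀ (ys : List Int) (x : Int) (k : Nat) (acc : List (Int × Nat)),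
      (List.foldl stepRun ((x, k) :: acc) ys).reverse =
        acc.reverse ++ (x, k + (ys.takeWhile (· == x)).length)
          :: specRuns (ys.dropWhile (· == x)) := by
  intro ys
  induction ys with
  | nil => intro x k acc; simp [specRuns]
  | cons y ys ih =>
    intro x k acc
    by_cases h : x = y
    · subst h
      have hstep : stepRun ((x, k) :: acc) x = (x, k + 1) :: acc := by simp [stepRun]
      rw [List.foldl_cons, hstep, ih]
      have ht : List.takeWhile (· == x) (x :: ys) = x :: List.takeWhile (· == x) ys := by
        simp [List.takeWhile_cons]
      have hd : List.dropWhile (· == x) (x :: ys) = List.dropWhile (· == x) ys := by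
        simp [List.dropWhile_cons]
      rw [ht, hd, List.length_cons]
      have : k + 1 + (List.takeWhile (· == x) ys).length
           = k + ((List.takeWhile (· == x) ys).length + 1) := by omega
      rw [this]
    · have hstep : stepRun ((x, k) :: acc) y = (y, 1) :: (x, k) :: acc := by
        simp [stepRun, h]
      rw [List.foldl_cons, hstep, ih]
      have hb : (y == x) = false := by simp; omega
      have ht : List.takeWhile (· == x) (y :: ys) = [] := by
        simp only [List.takeWhile_cons, hb, Bool.false_eq_true, if_false, List.length_nil,
        Nat.add_zero]
      have hd : List.dropWhile (· == x) (y :: ys) = y :: ys := by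
        simp [List.dropWhile_cons, hb]
      rw [ht, hd]
      simp [specRuns, List.append_assoc]

theorem runsB_eq_specRuns (l : List Int) : runsB l = specRuns l := by
  cases l with
  | nil => simp [runsB, specRuns]
  | cons x xs =>
    have h0 : stepRun [] x = [(x, 1)] := rfl
    unfold runsB
    rw [List.foldl_cons, h0, foldl_stepRun_spec]
    simp [specRuns]

-- ===== VERDICT (by name: the statement is the Claim_ definition above) =====
theorem makeFunc_spec : Claim_equal_makeFunc := by
  intro list1 list2 _ _
  unfold Spec_makeFunc makeFunc makeFunc_alt
  rw [runsB_eq_specRuns]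
  have := loopA_eq_emitB list1 list2 list1.length 0 (by omega)
  simpa using this
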